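-- pv_equiv track=rewrite | github.com/emielol/symptom-risk-visualization | backend/model/encoding.py | encode_user_symptoms
-- ===== SOURCE A (Python) =====
-- from typing import List, Dict, Any
--
-- def encode_user_symptoms(
--     request_json: Dict[str, Any],
--     feature_columns: List[str],
--     severity_lookup: Dict[str, int]
--         ) -> List[int]:
--     """
--     Transforms a list of symptoms from a JSON request into a weighted numerical vector.
--
--     Args:
--         request_json (dict): The incoming API request body.
--         feature_columns (list): The list of features the model was trained on.
--         severity_lookup (dict): dictionary mapping symptom names to their severity weights.
--
--     Returns:
--         List[int]: A numerical vector where indices correspond to feature_columns.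
--     """
--     # Create empty vector of zeroes
--     vector = [0] * len(feature_columns)
--
--     # Extract symptoms from request
--     input_symptoms = request_json.get("symptoms", [])
--
--     # Pre-build a map of feature names to their index for O(1) lookup speed
--     feature_to_idx = {name: i for i, name in enumerate(feature_columns)}
--
--     for symptom in input_symptoms:
--         # Standardize string format to match feature column naming conventions
--         clean_symptom = symptom.strip().lower().replace(" ", "_")
--
--         if clean_symptom in feature_to_idx:
--             index = feature_to_idx[clean_symptom]
--             # Use the severity weight, defaulting to 1 if not found in lookup
--             vector[index] = severity_lookup.get(symptom, 1)
--
--     return vector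
-- ===== SOURCE B (Python) =====
-- from typing import List, Dict, Any
--
-- def encode_user_symptoms(
--     request_json: Dict[str, Any],
--     feature_columns: List[str],
--     severity_lookup: Dict[str, int]
--         ) -> List[int]:
--     # Gather formulation: build a weight table keyed by the cleaned symptom
--     # name (last occurrence wins, as dict insertion overwrites), then read the
--     # vector off feature_columns positionally.
--     weights = {
--         symptom.strip().lower().replace(" ", "_"): severity_lookup.get(symptom, 1)
--         for symptom in request_json.get("symptoms", [])
--     }
--     return [weights.get(name, 0) for name in feature_columns]
-- ===== Notes on version B (the rewrite author's own statement) =====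
-- stated objective: simpler
-- what changed: Instead of pre-zeroing a vector, building a name-to-index map and scattering writes into the vector, B builds a weight dict keyed by the cleaned symptom name in one comprehension and gathers the output with weights.get(name, 0) over feature_columns.
-- outside the precondition, e.g. on encode_user_symptoms({'symptoms': ['a']}, ['a', 'a'], {}): A returns [0, 1], B returns [1, 1]
import Mathlib
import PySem

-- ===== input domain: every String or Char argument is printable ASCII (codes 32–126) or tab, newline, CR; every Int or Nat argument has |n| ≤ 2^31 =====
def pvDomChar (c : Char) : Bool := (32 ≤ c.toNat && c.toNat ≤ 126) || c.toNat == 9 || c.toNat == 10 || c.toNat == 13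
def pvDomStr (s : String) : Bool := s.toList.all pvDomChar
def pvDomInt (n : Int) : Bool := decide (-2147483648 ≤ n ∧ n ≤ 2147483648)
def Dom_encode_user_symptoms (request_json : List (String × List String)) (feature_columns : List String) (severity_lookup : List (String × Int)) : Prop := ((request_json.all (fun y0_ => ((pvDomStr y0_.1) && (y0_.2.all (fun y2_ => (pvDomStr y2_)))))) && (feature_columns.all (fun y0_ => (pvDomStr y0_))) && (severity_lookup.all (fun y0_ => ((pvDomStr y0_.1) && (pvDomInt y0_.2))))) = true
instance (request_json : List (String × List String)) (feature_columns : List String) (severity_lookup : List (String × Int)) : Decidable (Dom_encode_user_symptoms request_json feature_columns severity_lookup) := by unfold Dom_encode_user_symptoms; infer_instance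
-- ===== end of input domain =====

-- ===== PORT A =====
-- B gathers the output over feature_columns from a weight table keyed by cleaned
-- symptom name, instead of A's scatter into a pre-zeroed vector via a name-to-index map.
-- helper: clean_symptom = symptom.strip().lower().replace(" ", "_")
def cleanSym (s : String) : String :=
  PySem.Str.replace (PySem.Str.lower (PySem.Str.strip s)) " " "_"

def encode_user_symptoms (request_json : List (String × List String)) (feature_columns : List String) (severity_lookup : List (String × Int)) : List Int :=
  -- vector = [0] * len(feature_columns)
  let vector : List Int := List.replicate feature_columns.length 0
  -- input_symptoms = request_json.get("symptoms", [])
  let input_symptoms := (PySem.Dict.ofList request_json).getD "symptoms" []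
  -- feature_to_idx = {name: i for i, name in enumerate(feature_columns)}
  let feature_to_idx : PySem.Dict String Int :=
    (PySem.List.enumerate feature_columns).foldl (fun d p => d.insert p.2 p.1) PySem.Dict.empty
  -- for symptom in input_symptoms: if clean_symptom in feature_to_idx: vector[index] = severity_lookup.get(symptom, 1)
  input_symptoms.foldl (fun vec symptom =>
    let clean_symptom := cleanSym symptom
    if feature_to_idx.contains clean_symptom then
      let index := feature_to_idx.getD clean_symptom 0
      PySem.List.pySetD vec index ((PySem.Dict.ofList severity_lookup).getD symptom 1)
    else vec) vector

-- ===== PORT B =====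
def encode_user_symptoms_alt (request_json : List (String × List String)) (feature_columns : List String) (severity_lookup : List (String × Int)) : List Int :=
  -- weights = {clean(symptom): severity_lookup.get(symptom, 1) for symptom in request_json.get("symptoms", [])}
  let weights : PySem.Dict String Int :=
    ((PySem.Dict.ofList request_json).getD "symptoms" []).foldl
      (fun d symptom => d.insert (cleanSym symptom) ((PySem.Dict.ofList severity_lookup).getD symptom 1))
      PySem.Dict.empty
  -- [weights.get(name, 0) for name in feature_columns]
  feature_columns.map (fun name => weights.getD name 0)

-- ===== PRECONDITION & SPEC =====
-- Pre_ excludes inputs (on which A still returns) where some cleaned input symptom names a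
-- feature column that occurs more than once in feature_columns: there A writes the weight only
-- at the duplicate's last index while B fills every occurrence, both defensible accidents of
-- representing an intended-unique feature list.
def Pre_encode_user_symptoms (request_json : List (String × List String)) (feature_columns : List String) (severity_lookup : List (String × Int)) : Prop :=
  ∀ s ∈ (PySem.Dict.ofList request_json).getD "symptoms" [], feature_columns.count (cleanSym s) ≤ 1
instance (request_json : List (String × List String)) (feature_columns : List String) (severity_lookup : List (String × Int)) : Decidable (Pre_encode_user_symptoms request_json feature_columns severity_lookup) := by unfold Pre_encode_user_symptoms; infer_instance

def pvWitness_encode_user_symptoms : (List (String × List String)) × List String × (List (String × Int)) :=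
  ([("symptoms", ["Head Ache", "fever "])], ["head_ache", "fever", "cough"], [("fever ", 3)])

def Spec_encode_user_symptoms (request_json : List (String × List String)) (feature_columns : List String) (severity_lookup : List (String × Int)) (out : List Int) : Prop := out = encode_user_symptoms_alt request_json feature_columns severity_lookup
instance (request_json : List (String × List String)) (feature_columns : List String) (severity_lookup : List (String × Int)) (out : List Int) : Decidable (Spec_encode_user_symptoms request_json feature_columns severity_lookup out) := by unfold Spec_encode_user_symptoms; infer_instance

-- ===== CLAIM (what is proved, stated in full; the proofs are below) =====
def Claim_equal_encode_user_symptoms : Prop := ∀ (request_json : List (String × List String)) (feature_columns : List String) (severity_lookup : List (String × Int)), Dom_encode_user_symptoms request_json feature_columns severity_lookup → Pre_encode_user_symptoms request_json feature_columns severity_lookup → Spec_encode_user_symptoms request_json feature_columns severity_lookup (encode_user_symptoms request_json feature_columns severity_lookup)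

-- ===== LEMMAS AND PROOFS =====
-- A's name-to-index dict, as a proof-side abbreviation
def idxDict (fc : List String) : PySem.Dict String Int :=
  (PySem.List.enumerate fc).foldl (fun d p => d.insert p.2 p.1) PySem.Dict.empty

-- inserts at other keys preserve a lookup
theorem get?_foldl_of_not_mem (l : List (Int × String)) (d : PySem.Dict String Int)
    (name : String) (h : name ∉ l.map (·.2)) :
    (l.foldl (fun d p => d.insert p.2 p.1) d).get? name = d.get? name := by
  induction l generalizing d with
  | nil => rfl
  | cons p l ih =>
    simp only [List.map_cons, List.mem_cons, not_or] at h
    rw [List.foldl_cons, ih _ h.2, PySem.Dict.get?_insert_of_ne _ _ h.1]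

theorem map_snd_enumerate' (xs : List String) (s : Int) :
    (PySem.List.enumerate xs s).map (·.2) = xs := PySem.List.map_snd_enumerate xs s

-- a name occurring exactly once gets the index of its unique occurrence
theorem get?_enumFold_of_count_one (fc : List String) (name : String) :
    ∀ (s : Int) (d : PySem.Dict String Int), fc.count name = 1 →
    ((PySem.List.enumerate fc s).foldl (fun d p => d.insert p.2 p.1) d).get? name
      = some (s + (fc.idxOf name : Int)) := by
  induction fc with
  | nil => intro s d h; simp at h
  | cons x fc ih =>
    intro s d h
    rw [PySem.List.enumerate_cons, List.foldl_cons]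
    by_cases hx : x = name
    · subst hx
      have hnot : x ∉ fc := by
        rw [List.count_cons_self] at h
        exact List.count_eq_zero.1 (by omega)
      rw [get?_foldl_of_not_mem _ _ _ (by rwa [map_snd_enumerate'])]
      rw [PySem.Dict.get?_insert_self, List.idxOf_cons_self]
      simp
    · have h' : fc.count name = 1 := by
        simpa [hx] using h
      rw [ih (s + 1) _ h', List.idxOf_cons_ne _ hx]
      push_cast
      ring_nf

theorem contains_idxDict (fc : List String) (name : String) :
    (idxDict fc).contains name = decide (name ∈ fc) := by
  have hkeys : (idxDict fc).keys = PySem.Set.ofList fc := by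
    unfold idxDict
    rw [PySem.Dict.keys_foldl_insert_key (PySem.List.enumerate fc) (fun p => p.2) (fun _ p => p.1)]
    rw [map_snd_enumerate']
    rfl
  have hiff := PySem.Dict.contains_iff_mem_keys (d := idxDict fc) (k := name)
  rw [hkeys, PySem.Set.mem_ofList] at hiff
  by_cases hm : name ∈ fc
  · simp [hm, hiff.2 hm]
  · simp only [hm, decide_false]
    rcases Bool.eq_false_or_eq_true ((idxDict fc).contains name) with hc | hc
    · exact absurd (hiff.1 hc) hm
    · exact hc

theorem idx_unique (fc : List String) (c : String) (h1 : fc.count c = 1)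
    (i : Nat) (hi : i < fc.length) (hic : fc[i] = c) : i = List.idxOf c fc := by
  have hm : c ∈ fc := List.one_le_count_iff.1 (by omega)
  have hjlt : List.idxOf c fc < fc.length := List.idxOf_lt_length_of_mem hm
  have hfj : fc[List.idxOf c fc] = c := List.getElem_idxOf hjlt
  by_contra hne
  have hdup : fc.Duplicate c := by
    rw [List.duplicate_iff_exists_distinct_get]
    rcases Nat.lt_or_ge i (List.idxOf c fc) with hlt | hge
    · exact ⟨⟨i, hi⟩, ⟨List.idxOf c fc, hjlt⟩, by simpa using hlt, by simp [hic], by simp [hfj]⟩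
    · have hlt : List.idxOf c fc < i := by omega
      exact ⟨⟨List.idxOf c fc, hjlt⟩, ⟨i, hi⟩, by simpa using hlt, by simp [hfj], by simp [hic]⟩
  have := List.duplicate_iff_two_le_count.1 hdup
  omega

theorem step_eq (fc : List String) (d : PySem.Dict String Int)
    (c : String) (w : Int) (hc1 : fc.count c ≤ 1) :
    (if (idxDict fc).contains c then
        PySem.List.pySetD (fc.map (fun x => d.getD x 0)) ((idxDict fc).getD c 0) w
     else fc.map (fun x => d.getD x 0))
    = fc.map (fun x => (d.insert c w).getD x 0) := by
  rw [contains_idxDict fc c]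
  by_cases hm : c ∈ fc
  · simp only [hm, decide_true, if_true]
    have h1 : fc.count c = 1 := le_antisymm hc1 (List.one_le_count_iff.2 hm)
    have hjlt : List.idxOf c fc < fc.length := List.idxOf_lt_length_of_mem hm
    have hfj : fc[List.idxOf c fc] = c := List.getElem_idxOf hjlt
    have hgd : (idxDict fc).getD c 0 = (List.idxOf c fc : Int) := by
      rw [PySem.Dict.getD_eq_get?_getD]
      unfold idxDict
      rw [get?_enumFold_of_count_one fc c 0 PySem.Dict.empty h1]
      simp
    rw [hgd, PySem.List.pySetD_natCast]
    apply List.ext_getElem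
    · simp
    · intro i h1' h2
      have hi : i < fc.length := by simpa using h2
      rw [List.getElem_set, List.getElem_map, List.getElem_map, PySem.Dict.getD_insert]
      by_cases he : List.idxOf c fc = i
      · rw [if_pos he, if_pos (he ▸ hfj)]
      · rw [if_neg he, if_neg (fun hh => he (idx_unique fc c h1 i hi hh).symm)]
  · simp only [hm, decide_false]
    apply List.map_congr_left
    intro x hx
    exact (PySem.Dict.getD_insert_of_ne d w 0 (fun hh : x = c => hm (hh ▸ hx))).symm

theorem loop_eq (fc : List String) (sev : String → Int)
    (syms : List String) (hall : ∀ s ∈ syms, fc.count (cleanSym s) ≤ 1)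
    (d : PySem.Dict String Int) :
    syms.foldl (fun vec symptom =>
      let c := cleanSym symptom
      if (idxDict fc).contains c then
        PySem.List.pySetD vec ((idxDict fc).getD c 0) (sev symptom)
      else vec) (fc.map (fun x => d.getD x 0))
    = fc.map (fun x => (syms.foldl (fun d s => d.insert (cleanSym s) (sev s)) d).getD x 0) := by
  induction syms generalizing d with
  | nil => rfl
  | cons s ss ih =>
    simp only [List.foldl_cons]
    rw [show (let c := cleanSym s;
        if (idxDict fc).contains c then
          PySem.List.pySetD (fc.map (fun x => d.getD x 0)) ((idxDict fc).getD c 0) (sev s)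
        else fc.map (fun x => d.getD x 0))
      = fc.map (fun x => (d.insert (cleanSym s) (sev s)).getD x 0)
      from step_eq fc d (cleanSym s) (sev s) (hall s (List.mem_cons_self ..))]
    exact ih (fun t ht => hall t (List.mem_cons_of_mem _ ht)) (d.insert (cleanSym s) (sev s))

-- ===== VERDICT (by name: the statement is the Claim_ definition above) =====
theorem encode_user_symptoms_spec : Claim_equal_encode_user_symptoms := by
  intro rj fc sl _hdom hpre
  unfold Spec_encode_user_symptoms encode_user_symptoms encode_user_symptoms_alt
  have hinit : (List.replicate fc.length (0:Int))
      = fc.map (fun x => (PySem.Dict.empty : PySem.Dict String Int).getD x 0) := by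
    simp [PySem.Dict.getD_empty]
  rw [hinit]
  exact loop_eq fc (fun s => (PySem.Dict.ofList sl).getD s 1)
    ((PySem.Dict.ofList rj).getD "symptoms" []) hpre PySem.Dict.empty
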